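-- pv_equiv track=rewrite | github.com/Sooraj-gizmeon/ai_detection | src/content_analysis/prompt_based_analyzer.py | _match_focus_tokens
-- ===== SOURCE A (Python) =====
-- def _match_focus_tokens(text: str, focus_tokens: set) -> set:
--     if not text or not focus_tokens:
--         return set()
--     lower = text.lower()
--     matched = set()
--     for tok in focus_tokens:
--         if tok in lower:
--             matched.add(tok)
--     return matched
-- ===== SOURCE B (Python) =====
-- def _match_focus_tokens(text: str, focus_tokens: set) -> set:
--     if not text or not focus_tokens:
--         return set()
--     lower = text.lower()
--     n = len(lower)
--     # index every substring of the text whose length is a token length, once,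
--     # then test each token by one hash lookup
--     subs = set()
--     for L in {len(t) for t in focus_tokens}:
--         for i in range(n - L + 1):
--             subs.add(lower[i:i + L])
--     return {t for t in focus_tokens if t in subs}
-- ===== Notes on version B (the rewrite author's own statement) =====
-- stated objective: alternative
-- what changed: B replaces the per-token substring scan with a one-time index: it collects every substring of the lowered text whose length is one of the (distinct) token lengths into a hash set, then accepts each token by a single set lookup.
import Mathlib
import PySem

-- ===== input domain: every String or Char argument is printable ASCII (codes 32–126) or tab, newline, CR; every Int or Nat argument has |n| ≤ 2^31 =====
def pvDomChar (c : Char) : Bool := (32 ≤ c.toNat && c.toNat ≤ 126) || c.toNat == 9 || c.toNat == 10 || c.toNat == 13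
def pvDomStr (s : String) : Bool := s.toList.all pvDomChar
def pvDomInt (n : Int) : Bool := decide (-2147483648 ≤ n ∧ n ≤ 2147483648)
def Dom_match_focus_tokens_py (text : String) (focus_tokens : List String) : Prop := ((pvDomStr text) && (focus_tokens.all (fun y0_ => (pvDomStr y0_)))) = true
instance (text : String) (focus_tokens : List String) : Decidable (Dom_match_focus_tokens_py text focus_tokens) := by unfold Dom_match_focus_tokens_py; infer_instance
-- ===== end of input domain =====

-- B builds a one-time index of the text's substrings (one pass per distinct token length)
-- and tests each token by a set lookup, instead of one substring search per token; return
-- values agree as lists (same construction order), objective: alternative algorithm.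


-- ===== PORT A =====
def match_focus_tokens_py (text : String) (focus_tokens : List String) : List String :=
  if text = "" ∨ focus_tokens = [] then []
  else
    let lower := PySem.Str.lower text
    focus_tokens.foldl
      (fun matched tok => if PySem.Str.isIn tok lower then PySem.Set.add matched tok else matched)
      PySem.Set.empty

-- ===== PORT B =====
def match_focus_tokens_py_alt (text : String) (focus_tokens : List String) : List String :=
  if text = "" ∨ focus_tokens = [] then []
  else
    let lower := PySem.Str.lower text
    let n := PySem.Str.len lower
    let subs := (PySem.Set.ofList (focus_tokens.map PySem.Str.len)).foldl
      (fun s L => (PySem.List.pyRange 0 (n - L + 1) 1).foldl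
        (fun s i => PySem.Set.add s (PySem.Str.slice lower (some i) (some (i + L)))) s)
      PySem.Set.empty
    PySem.Set.ofList (focus_tokens.filter (fun t => PySem.Set.contains subs t))

-- ===== PRECONDITION & SPEC =====
def Spec_match_focus_tokens_py (text : String) (focus_tokens : List String) (out : List String) : Prop := out = match_focus_tokens_py_alt text focus_tokens
instance (text : String) (focus_tokens : List String) (out : List String) : Decidable (Spec_match_focus_tokens_py text focus_tokens out) := by unfold Spec_match_focus_tokens_py; infer_instance

-- ===== CLAIM (what is proved, stated in full; the proofs are below) =====
def Claim_equal_match_focus_tokens_py : Prop := ∀ (text : String) (focus_tokens : List String), Dom_match_focus_tokens_py text focus_tokens → Spec_match_focus_tokens_py text focus_tokens (match_focus_tokens_py text focus_tokens)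

-- ===== LEMMAS AND PROOFS =====

-- folding "if p then add" equals folding add over the filtered list
theorem pv_foldl_add_if (p : String → Bool) (ts : List String) (s : PySem.Set String) :
    ts.foldl (fun s t => if p t then PySem.Set.add s t else s) s
      = (ts.filter p).foldl PySem.Set.add s := by
  induction ts generalizing s with
  | nil => rfl
  | cons t ts ih =>
      by_cases h : p t = true <;> simp [h, ih]

-- membership in a fold that adds f of every element
theorem pv_mem_foldl_add {α β : Type} [BEq α] [LawfulBEq α] (f : β → α) (l : List β)
    (s : PySem.Set α) (x : α) :
    x ∈ l.foldl (fun s b => PySem.Set.add s (f b)) s ↔ x ∈ s ∨ ∃ b ∈ l, f b = x := by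
  induction l generalizing s with
  | nil => simp
  | cons b l ih =>
      simp only [List.foldl_cons, ih, PySem.Set.mem_add]
      constructor
      · rintro (⟨h | h⟩ | ⟨c, hc, rfl⟩)
        · exact Or.inl h
        · exact Or.inr ⟨b, by simp, h.symm⟩
        · exact Or.inr ⟨c, by simp [hc], rfl⟩
      · rintro (h | ⟨c, hc, rfl⟩)
        · exact Or.inl (Or.inl h)
        · rcases List.mem_cons.mp hc with rfl | hc
          · exact Or.inl (Or.inr rfl)
          · exact Or.inr ⟨c, hc, rfl⟩

-- membership in the nested fold building the substring index
theorem pv_mem_foldl_foldl_add {α β γ : Type} [BEq α] [LawfulBEq α]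
    (r : γ → List β) (g : γ → β → α) (l : List γ) (s : PySem.Set α) (x : α) :
    x ∈ l.foldl (fun s c => (r c).foldl (fun s b => PySem.Set.add s (g c b)) s) s
      ↔ x ∈ s ∨ ∃ c ∈ l, ∃ b ∈ r c, g c b = x := by
  induction l generalizing s with
  | nil => simp
  | cons c l ih =>
      simp only [List.foldl_cons, ih, pv_mem_foldl_add]
      constructor
      · rintro (⟨h | ⟨b, hb, rfl⟩⟩ | ⟨d, hd, hb⟩)
        · exact Or.inl h
        · exact Or.inr ⟨c, by simp, b, hb, rfl⟩
        · exact Or.inr ⟨d, by simp [hd], hb⟩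
      · rintro (h | ⟨d, hd, hb⟩)
        · exact Or.inl (Or.inl h)
        · rcases List.mem_cons.mp hd with rfl | hd
          · exact Or.inl (Or.inr hb)
          · exact Or.inr ⟨d, hd, hb⟩

-- a token is among the indexed substrings iff it occurs in the text
theorem pv_slice_exists_iff_isIn (lower t : String) (lens : List Int)
    (hmem : PySem.Str.len t ∈ lens) (hnn : ∀ L ∈ lens, 0 ≤ L) :
    (∃ L ∈ lens, ∃ i ∈ PySem.List.pyRange 0 (PySem.Str.len lower - L + 1) 1,
        PySem.Str.slice lower (some i) (some (i + L)) = t)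
      ↔ PySem.Str.isIn t lower = true := by
  constructor
  · rintro ⟨L, hL, i, hi, hsl⟩
    rw [PySem.List.mem_pyRange_one] at hi
    have h0L := hnn L hL
    have htl : t.toList = (lower.toList.drop i.toNat).take ((i + L).toNat - i.toNat) := by
      have := congrArg String.toList hsl
      rw [PySem.Str.toList_slice, PySem.Chars.slice_eq_listSlice,
        PySem.List.slice_toNat _ hi.1 (by omega)] at this
      exact this.symm
    rw [PySem.Str.isIn_eq, ← PySem.Chars.exists_prefix_drop_iff_isIn]
    exact ⟨i.toNat, htl ▸ List.take_prefix _ _⟩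
  · intro h
    rw [PySem.Str.isIn_eq, ← PySem.Chars.exists_prefix_drop_iff_isIn] at h
    obtain ⟨j, hj⟩ := h
    have hclamp : t.toList <+: lower.toList.drop (min j lower.toList.length) ∧
        min j lower.toList.length + t.toList.length ≤ lower.toList.length := by
      by_cases hle : j ≤ lower.toList.length
      · have hl := hj.length_le
        simp only [List.length_drop] at hl
        exact ⟨by rw [min_eq_left hle]; exact hj, by omega⟩
      · have hdrop : lower.toList.drop j = [] := List.drop_eq_nil_of_le (by omega)
        rw [hdrop] at hj
        have ht0 : t.toList = [] := List.prefix_nil.mp hj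
        exact ⟨by simp [ht0], by simp [ht0]⟩
    refine ⟨PySem.Str.len t, hmem, ((min j lower.toList.length : Nat) : Int), ?_, ?_⟩
    · rw [PySem.List.mem_pyRange_one, PySem.Str.len_eq, PySem.Str.len_eq]
      refine ⟨by positivity, ?_⟩
      have h2 := hclamp.2
      push_cast
      omega
    · rw [show PySem.Str.len t = ((t.toList.length : Nat) : Int) from PySem.Str.len_eq t]
      apply String.toList_injective
      rw [PySem.Str.toList_slice, PySem.Chars.slice_eq_listSlice,
        PySem.List.slice_natCast_add]
      exact (List.prefix_iff_eq_take.mp hclamp.1).symm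

-- ===== VERDICT (by name: the statement is the Claim_ definition above) =====
theorem match_focus_tokens_py_spec : Claim_equal_match_focus_tokens_py := by
  intro text focus_tokens _
  unfold Spec_match_focus_tokens_py match_focus_tokens_py match_focus_tokens_py_alt
  by_cases hg : text = "" ∨ focus_tokens = []
  · simp [hg]
  · simp only [hg, reduceIte]
    rw [pv_foldl_add_if, PySem.Set.ofList_eq_foldl]
    congr 1
    apply List.filter_congr
    intro t ht
    have hiff := pv_slice_exists_iff_isIn (PySem.Str.lower text) t
      (focus_tokens.map PySem.Str.len)
      (List.mem_map_of_mem ht)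
      (by intro L hL; obtain ⟨u, _, rfl⟩ := List.mem_map.mp hL
          rw [PySem.Str.len_eq]; positivity)
    rw [Bool.eq_iff_iff, PySem.Set.contains_iff, pv_mem_foldl_foldl_add]
    simp only [PySem.Set.mem_ofList, PySem.Set.empty, List.not_mem_nil, false_or]
    exact hiff.symm
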